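-- pv_equiv track=rewrite | github.com/barleen-kaur/LeetCode-Challenges | DS_Algo/Graphs/maxDistanceLand.py | maxDistance
-- ===== SOURCE A (Python) =====
-- from typing import List
--
-- def maxDistance(grid: List[List[int]]) -> int:
--
--     rows = len(grid)
--     cols = len(grid[0])
--     visited = [[False]*cols for _ in range(rows)]
--     max_min_dist = -1
--     queue = []
--
--     for X in range(rows):
--         for Y in range(cols):
--             if grid[X][Y] == 1:
--                 visited[X][Y] = True
--                 for dx, dy in [[-1,0],[0,1],[1,0],[0,-1]]:
--                     newX, newY = X + dx, Y + dy
--                     if 0 <= newX < rows and 0 <= newY < cols and not visited[newX][newY] and grid[newX][newY] == 0: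
--                         queue.append((newX, newY, 1))
--                         visited[newX][newY] = True
--
--
--     while queue:
--
--         X, Y, dist = queue.pop(0)
--
--         max_min_dist = max(max_min_dist, dist)
--
--         for dx, dy in [[-1,0],[0,1],[1,0],[0,-1]]:
--             newX, newY = X + dx, Y + dy
--             if 0 <= newX < rows and 0 <= newY < cols and not visited[newX][newY] and grid[newX][newY] == 0:
--                 queue.append((newX, newY, dist+1))
--                 visited[newX][newY] = True
--
--     return max_min_dist
-- ===== SOURCE B (Python) =====
-- def maxDistance(grid):
--     rows = len(grid)
--     cols = len(grid[0])
--     reached = [[grid[x][y] == 1 for y in range(cols)] for x in range(rows)]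
--     d = 0
--     for _ in range(rows * cols):
--         nxt = [[reached[x][y]
--                 or (grid[x][y] == 0
--                     and any(0 <= x + dx < rows and 0 <= y + dy < cols
--                             and reached[x + dx][y + dy]
--                             for dx, dy in ((-1, 0), (0, 1), (1, 0), (0, -1))))
--                 for y in range(cols)] for x in range(rows)]
--         if nxt == reached:
--             break
--         reached = nxt
--         d += 1
--     return d if d > 0 else -1
-- ===== Notes on version B (the rewrite author's own statement) =====
-- stated objective: alternative
-- what changed: Replaces the queue-based multi-source BFS (visited matrix + FIFO of (x,y,dist) triples) by fixed-point iteration of a whole-grid morphological dilation: starting from the land mask, recompute the entire reached-matrix each round (cell becomes reached if it is water adjacent to a reached cell) and count the rounds until the matrix stops changing.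
import Mathlib
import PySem

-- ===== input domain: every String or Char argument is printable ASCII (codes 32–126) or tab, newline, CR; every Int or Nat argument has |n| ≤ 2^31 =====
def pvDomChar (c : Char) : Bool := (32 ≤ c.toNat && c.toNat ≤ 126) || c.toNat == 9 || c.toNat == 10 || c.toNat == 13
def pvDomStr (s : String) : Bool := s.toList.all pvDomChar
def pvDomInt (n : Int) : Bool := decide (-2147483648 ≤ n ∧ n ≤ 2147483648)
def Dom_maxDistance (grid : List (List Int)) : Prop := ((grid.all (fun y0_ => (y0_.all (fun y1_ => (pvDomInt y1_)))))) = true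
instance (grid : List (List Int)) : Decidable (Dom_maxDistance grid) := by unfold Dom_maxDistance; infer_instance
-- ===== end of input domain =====

-- B replaces A's queue-based multi-source BFS by fixed-point iteration of a whole-grid dilation
-- (recompute the reached-matrix each round, count rounds until it stops changing); objective: alternative.

-- Shared small helpers (the literal 4-direction list, grid/visited accessors).
def pvDirs : List (Int × Int) := [(-1, 0), (0, 1), (1, 0), (0, -1)]

-- grid[x][y]; exact under the bounds guards of both programs (0 ≤ x < rows, 0 ≤ y < cols, rows of length ≥ cols by Pre_).
def pvCell (grid : List (List Int)) (x y : Int) : Int := (grid.getD x.toNat []).getD y.toNat 0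

-- visited[x][y] as an Option (some b when in bounds); A only reads it under the bounds guards, where it is exact.
def pvVis? (v : List (List Bool)) (x y : Int) : Option Bool :=
  match v[x.toNat]? with
  | none => none
  | some r => r[y.toNat]?

-- visited[x][y] = True
def pvMark (v : List (List Bool)) (x y : Nat) : List (List Bool) := v.set x ((v.getD x []).set y true)

-- number of unvisited cells: termination measure for A's BFS loop
def pvCF (v : List (List Bool)) : Nat := (v.map (fun r => r.count false)).sum

-- reached[x][y] as a Bool (B only reads it at indices inside the matrix it built, where getD is exact)
def pvGetB (v : List (List Bool)) (x y : Int) : Bool := (v.getD x.toNat []).getD y.toNat false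

-- termination lemmas (cited by name in the A port's decreasing_by)
theorem pv_count_set_false (r : List Bool) (b : Nat) (h : r[b]? = some false) :
    (r.set b true).count false + 1 = r.count false := by
  induction r generalizing b with
  | nil => simp at h
  | cons a t ih =>
    cases b with
    | zero =>
      simp at h
      subst h
      simp
    | succ b =>
      simp at h
      have := ih b h
      cases a <;> simp <;> omega

theorem pv_cf_set (v : List (List Bool)) (a b : Nat) (r : List Bool)
    (h1 : v[a]? = some r) (h2 : r[b]? = some false) :
    pvCF (v.set a (r.set b true)) + 1 = pvCF v := by
  induction v generalizing a with
  | nil => simp at h1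
  | cons rv tv ih =>
    cases a with
    | zero =>
      simp at h1
      subst h1
      have := pv_count_set_false _ b h2
      simp [pvCF]
      omega
    | succ a =>
      simp at h1
      have := ih a h1
      simp [pvCF] at this ⊢
      omega

theorem pv_cf_mark (v : List (List Bool)) (x y : Int) (h : pvVis? v x y = some false) :
    pvCF (pvMark v x.toNat y.toNat) + 1 = pvCF v := by
  unfold pvVis? at h
  cases hr : v[x.toNat]? with
  | none => simp [hr] at h
  | some r =>
    rw [hr] at h
    unfold pvMark
    have hgd : v.getD x.toNat [] = r := by simp [List.getD_eq_getElem?_getD, hr]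
    rw [hgd]
    exact pv_cf_set v x.toNat y.toNat r hr h

-- ===== PORT A =====
-- one neighbour check of A's inner `for dx, dy in [[-1,0],[0,1],[1,0],[0,-1]]` loop; nd is the distance value appended
def stepA (grid : List (List Int)) (rows cols x y nd : Int)
    (st : List (List Bool) × List (Int × Int × Int)) (dxy : Int × Int) :
    List (List Bool) × List (Int × Int × Int) :=
  if 0 ≤ x + dxy.1 ∧ x + dxy.1 < rows ∧ 0 ≤ y + dxy.2 ∧ y + dxy.2 < cols ∧
      pvVis? st.1 (x + dxy.1) (y + dxy.2) = some false ∧ pvCell grid (x + dxy.1) (y + dxy.2) = 0 then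
    (pvMark st.1 (x + dxy.1).toNat (y + dxy.2).toNat, st.2 ++ [(x + dxy.1, y + dxy.2, nd)])
  else st

def expandA (grid : List (List Int)) (rows cols x y nd : Int)
    (st : List (List Bool) × List (Int × Int × Int)) : List (List Bool) × List (Int × Int × Int) :=
  pvDirs.foldl (stepA grid rows cols x y nd) st

theorem pv_measA (grid : List (List Int)) (rows cols x y nd : Int) (ds : List (Int × Int))
    (st : List (List Bool) × List (Int × Int × Int)) :
    2 * pvCF (ds.foldl (stepA grid rows cols x y nd) st).1 + (ds.foldl (stepA grid rows cols x y nd) st).2.length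
      ≤ 2 * pvCF st.1 + st.2.length := by
  induction ds generalizing st with
  | nil => simp
  | cons d ds ih =>
    refine le_trans (ih _) ?_
    unfold stepA
    split_ifs with h
    · have := pv_cf_mark st.1 (x + d.1) (y + d.2) h.2.2.2.2.1
      simp; omega
    · simp

-- the seed double loop: for X in range(rows): for Y in range(cols): if grid[X][Y]==1: mark; push water neighbours with dist 1
def seedA (grid : List (List Int)) (rows cols : Int) : List (List Bool) × List (Int × Int × Int) :=
  (PySem.List.pyRange 0 rows 1).foldl (fun st x =>
    (PySem.List.pyRange 0 cols 1).foldl (fun st y =>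
      if pvCell grid x y = 1 then
        expandA grid rows cols x y 1 (pvMark st.1 x.toNat y.toNat, st.2)
      else st) st)
    (List.replicate rows.toNat (List.replicate cols.toNat false), [])

-- while queue: X,Y,dist = queue.pop(0); max_min_dist = max(...); append unvisited water neighbours with dist+1
def loopA (grid : List (List Int)) (rows cols : Int) (vis : List (List Bool)) (m : Int)
    (queue : List (Int × Int × Int)) : Int :=
  match queue with
  | [] => m
  | (x, y, d) :: q =>
    let st := expandA grid rows cols x y (d + 1) (vis, q)
    loopA grid rows cols st.1 (max m d) st.2
termination_by 2 * pvCF vis + queue.length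
decreasing_by
  have := pv_measA grid rows cols x y (d + 1) pvDirs (vis, q)
  simp only [expandA] at *
  simp at *
  omega

def maxDistance (grid : List (List Int)) : Int :=
  let rows : Int := grid.length
  let cols : Int := (grid.headD []).length
  let s := seedA grid rows cols
  loopA grid rows cols s.1 (-1) s.2

-- ===== PORT B =====
-- nxt = [[reached[x][y] or (grid[x][y]==0 and any(in-bounds and reached neighbour)) for y ...] for x ...]
def dilate (grid : List (List Int)) (rows cols : Int) (v : List (List Bool)) : List (List Bool) :=
  (PySem.List.pyRange 0 rows 1).map (fun x =>
    (PySem.List.pyRange 0 cols 1).map (fun y =>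
      pvGetB v x y ||
        (decide (pvCell grid x y = 0) &&
          pvDirs.any (fun d =>
            decide (0 ≤ x + d.1) && decide (x + d.1 < rows) &&
            decide (0 ≤ y + d.2) && decide (y + d.2 < cols) &&
            pvGetB v (x + d.1) (y + d.2)))))

-- reached = [[grid[x][y] == 1 for y in range(cols)] for x in range(rows)]
def landInit (grid : List (List Int)) (rows cols : Int) : List (List Bool) :=
  (PySem.List.pyRange 0 rows 1).map (fun x =>
    (PySem.List.pyRange 0 cols 1).map (fun y => decide (pvCell grid x y = 1)))

-- for _ in range(rows*cols): nxt = dilate(reached); if nxt == reached: break; reached = nxt; d += 1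
def loopDil (grid : List (List Int)) (rows cols : Int) : Nat → List (List Bool) → Int → Int
  | 0, _, d => if 0 < d then d else -1
  | n + 1, reached, d =>
    let nxt := dilate grid rows cols reached
    if nxt = reached then (if 0 < d then d else -1)
    else loopDil grid rows cols n nxt (d + 1)

def maxDistance_alt (grid : List (List Int)) : Int :=
  let rows : Int := grid.length
  let cols : Int := (grid.headD []).length
  loopDil grid rows cols (rows * cols).toNat (landInit grid rows cols) 0

-- ===== PRECONDITION & SPEC =====
-- Pre_ excludes exactly the inputs where Python A raises IndexError: the empty grid (grid[0]) and
-- grids with a row shorter than the first row (grid[X][Y] for Y < len(grid[0])).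
def Pre_maxDistance (grid : List (List Int)) : Prop :=
  grid ≠ [] ∧ ∀ r ∈ grid, (grid.headD []).length ≤ r.length

instance (grid : List (List Int)) : Decidable (Pre_maxDistance grid) := by
  unfold Pre_maxDistance; infer_instance

def pvWitness_maxDistance : List (List Int) := [[1, 0], [0, 0]]

def Spec_maxDistance (grid : List (List Int)) (out : Int) : Prop := out = maxDistance_alt grid
instance (grid : List (List Int)) (out : Int) : Decidable (Spec_maxDistance grid out) := by
  unfold Spec_maxDistance; infer_instance

-- ===== CLAIM (what is proved, stated in full; the proofs are below) =====
def Claim_equal_maxDistance : Prop :=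
  ∀ (grid : List (List Int)), Dom_maxDistance grid → Pre_maxDistance grid →
    Spec_maxDistance grid (maxDistance grid)

-- ===== LEMMAS AND PROOFS =====

-- ---- proof-side reformulation of A as a level-by-level BFS ----
def stepL (grid : List (List Int)) (rows cols x y : Int)
    (st : List (List Bool) × List (Int × Int)) (dxy : Int × Int) :
    List (List Bool) × List (Int × Int) :=
  if 0 ≤ x + dxy.1 ∧ x + dxy.1 < rows ∧ 0 ≤ y + dxy.2 ∧ y + dxy.2 < cols ∧
      pvVis? st.1 (x + dxy.1) (y + dxy.2) = some false ∧ pvCell grid (x + dxy.1) (y + dxy.2) = 0 then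
    (pvMark st.1 (x + dxy.1).toNat (y + dxy.2).toNat, st.2 ++ [(x + dxy.1, y + dxy.2)])
  else st

def levelFoldL (grid : List (List Int)) (rows cols : Int)
    (st : List (List Bool) × List (Int × Int)) (cells : List (Int × Int)) :
    List (List Bool) × List (Int × Int) :=
  cells.foldl (fun st p => pvDirs.foldl (stepL grid rows cols p.1 p.2) st) st

theorem pv_measL (grid : List (List Int)) (rows cols x y : Int) (ds : List (Int × Int))
    (st : List (List Bool) × List (Int × Int)) :
    2 * pvCF (ds.foldl (stepL grid rows cols x y) st).1 + (ds.foldl (stepL grid rows cols x y) st).2.length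
      ≤ 2 * pvCF st.1 + st.2.length := by
  induction ds generalizing st with
  | nil => simp
  | cons d ds ih =>
    refine le_trans (ih _) ?_
    unfold stepL
    split_ifs with h
    · have := pv_cf_mark st.1 (x + d.1) (y + d.2) h.2.2.2.2.1
      simp; omega
    · simp

theorem pv_measL_cells (grid : List (List Int)) (rows cols : Int) (cells : List (Int × Int))
    (st : List (List Bool) × List (Int × Int)) :
    2 * pvCF (levelFoldL grid rows cols st cells).1 + (levelFoldL grid rows cols st cells).2.length
      ≤ 2 * pvCF st.1 + st.2.length := by
  induction cells generalizing st with
  | nil => simp [levelFoldL]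
  | cons c cs ih =>
    unfold levelFoldL at *
    simp only [List.foldl_cons]
    exact le_trans (ih _) (pv_measL grid rows cols c.1 c.2 pvDirs st)

def seedL (grid : List (List Int)) (rows cols : Int) : List (List Bool) × List (Int × Int) :=
  (PySem.List.pyRange 0 rows 1).foldl (fun st x =>
    (PySem.List.pyRange 0 cols 1).foldl (fun st y =>
      if pvCell grid x y = 1 then
        pvDirs.foldl (stepL grid rows cols x y) (pvMark st.1 x.toNat y.toNat, st.2)
      else st) st)
    (List.replicate rows.toNat (List.replicate cols.toNat false), [])

def loopLvl (grid : List (List Int)) (rows cols : Int) (vis : List (List Bool)) (dist : Int)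
    (level : List (Int × Int)) : Int :=
  match level with
  | [] => dist
  | p :: rest =>
    let s := levelFoldL grid rows cols (vis, []) (p :: rest)
    loopLvl grid rows cols s.1 (dist + 1) s.2
termination_by 2 * pvCF vis + level.length
decreasing_by
  have := pv_measL_cells grid rows cols (p :: rest) (vis, [])
  simp at *
  omega

def pvTag (d : Int) (p : Int × Int) : Int × Int × Int := (p.1, p.2, d)

-- peeling the accumulator off A's direction fold
theorem pv_accA (grid : List (List Int)) (rows cols x y nd : Int) (ds : List (Int × Int))
    (v : List (List Bool)) (acc : List (Int × Int × Int)) :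
    ds.foldl (stepA grid rows cols x y nd) (v, acc) =
      ((ds.foldl (stepA grid rows cols x y nd) (v, [])).1,
        acc ++ (ds.foldl (stepA grid rows cols x y nd) (v, [])).2) := by
  induction ds generalizing v acc with
  | nil => simp
  | cons d ds ih =>
    simp only [List.foldl_cons]
    by_cases h : 0 ≤ x + d.1 ∧ x + d.1 < rows ∧ 0 ≤ y + d.2 ∧ y + d.2 < cols ∧
        pvVis? v (x + d.1) (y + d.2) = some false ∧ pvCell grid (x + d.1) (y + d.2) = 0
    · simp only [stepA, if_pos h]
      rw [ih (pvMark v (x + d.1).toNat (y + d.2).toNat) (acc ++ [(x + d.1, y + d.2, nd)]),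
        ih (pvMark v (x + d.1).toNat (y + d.2).toNat) ([] ++ [(x + d.1, y + d.2, nd)])]
      simp
    · simp only [stepA, if_neg h]
      exact ih v acc

-- peeling the accumulator off the level fold
theorem pv_accL (grid : List (List Int)) (rows cols x y : Int) (ds : List (Int × Int))
    (v : List (List Bool)) (acc : List (Int × Int)) :
    ds.foldl (stepL grid rows cols x y) (v, acc) =
      ((ds.foldl (stepL grid rows cols x y) (v, [])).1,
        acc ++ (ds.foldl (stepL grid rows cols x y) (v, [])).2) := by
  induction ds generalizing v acc with
  | nil => simp
  | cons d ds ih =>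
    simp only [List.foldl_cons]
    by_cases h : 0 ≤ x + d.1 ∧ x + d.1 < rows ∧ 0 ≤ y + d.2 ∧ y + d.2 < cols ∧
        pvVis? v (x + d.1) (y + d.2) = some false ∧ pvCell grid (x + d.1) (y + d.2) = 0
    · simp only [stepL, if_pos h]
      rw [ih (pvMark v (x + d.1).toNat (y + d.2).toNat) (acc ++ [(x + d.1, y + d.2)]),
        ih (pvMark v (x + d.1).toNat (y + d.2).toNat) ([] ++ [(x + d.1, y + d.2)])]
      simp
    · simp only [stepL, if_neg h]
      exact ih v acc

-- A's direction fold is the level fold with every appended pair tagged by nd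
theorem pv_cellAL (grid : List (List Int)) (rows cols x y nd : Int) (ds : List (Int × Int))
    (v : List (List Bool)) (acc : List (Int × Int)) :
    ds.foldl (stepA grid rows cols x y nd) (v, acc.map (pvTag nd)) =
      ((ds.foldl (stepL grid rows cols x y) (v, acc)).1,
        (ds.foldl (stepL grid rows cols x y) (v, acc)).2.map (pvTag nd)) := by
  induction ds generalizing v acc with
  | nil => simp
  | cons d ds ih =>
    simp only [List.foldl_cons]
    by_cases h : 0 ≤ x + d.1 ∧ x + d.1 < rows ∧ 0 ≤ y + d.2 ∧ y + d.2 < cols ∧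
        pvVis? v (x + d.1) (y + d.2) = some false ∧ pvCell grid (x + d.1) (y + d.2) = 0
    · simp only [stepA, stepL, if_pos h]
      have hacc : (acc.map (pvTag nd)) ++ [(x + d.1, y + d.2, nd)]
          = (acc ++ [(x + d.1, y + d.2)]).map (pvTag nd) := by simp [pvTag]
      rw [hacc]
      exact ih _ _
    · simp only [stepA, stepL, if_neg h]
      exact ih v acc

-- A's seed equals the level seed with the frontier tagged by distance 1
theorem pv_seed_inner (grid : List (List Int)) (rows cols x : Int) (ys : List Int)
    (v : List (List Bool)) (acc : List (Int × Int)) :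
    ys.foldl (fun st y =>
        if pvCell grid x y = 1 then
          expandA grid rows cols x y 1 (pvMark st.1 x.toNat y.toNat, st.2)
        else st) (v, acc.map (pvTag 1)) =
      ((ys.foldl (fun st y =>
          if pvCell grid x y = 1 then
            pvDirs.foldl (stepL grid rows cols x y) (pvMark st.1 x.toNat y.toNat, st.2)
          else st) (v, acc)).1,
        (ys.foldl (fun st y =>
          if pvCell grid x y = 1 then
            pvDirs.foldl (stepL grid rows cols x y) (pvMark st.1 x.toNat y.toNat, st.2)
          else st) (v, acc)).2.map (pvTag 1)) := by
  induction ys generalizing v acc with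
  | nil => simp
  | cons y ys ih =>
    simp only [List.foldl_cons]
    by_cases h : pvCell grid x y = 1
    · simp only [h, if_pos]
      rw [show (expandA grid rows cols x y 1 (pvMark v x.toNat y.toNat, acc.map (pvTag 1))) =
            (let s := pvDirs.foldl (stepL grid rows cols x y) (pvMark v x.toNat y.toNat, acc);
              (s.1, s.2.map (pvTag 1))) from pv_cellAL grid rows cols x y 1 pvDirs _ acc]
      exact ih _ _
    · simp only [h, if_neg, not_false_iff]
      exact ih v acc

theorem pv_seedAL (grid : List (List Int)) (rows cols : Int) :
    seedA grid rows cols =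
      ((seedL grid rows cols).1, (seedL grid rows cols).2.map (pvTag 1)) := by
  unfold seedA seedL expandA
  generalize (List.replicate rows.toNat (List.replicate cols.toNat false)) = v0
  have main : ∀ (xs : List Int) (v : List (List Bool)) (acc : List (Int × Int)),
      xs.foldl (fun st x =>
          (PySem.List.pyRange 0 cols 1).foldl (fun st y =>
            if pvCell grid x y = 1 then
              pvDirs.foldl (stepA grid rows cols x y 1) (pvMark st.1 x.toNat y.toNat, st.2)
            else st) st) (v, acc.map (pvTag 1)) =
        ((xs.foldl (fun st x =>
            (PySem.List.pyRange 0 cols 1).foldl (fun st y =>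
              if pvCell grid x y = 1 then
                pvDirs.foldl (stepL grid rows cols x y) (pvMark st.1 x.toNat y.toNat, st.2)
              else st) st) (v, acc)).1,
          (xs.foldl (fun st x =>
            (PySem.List.pyRange 0 cols 1).foldl (fun st y =>
              if pvCell grid x y = 1 then
                pvDirs.foldl (stepL grid rows cols x y) (pvMark st.1 x.toNat y.toNat, st.2)
              else st) st) (v, acc)).2.map (pvTag 1)) := by
    intro xs
    induction xs with
    | nil => intro v acc; simp
    | cons x xs ih =>
      intro v acc
      simp only [List.foldl_cons]
      rw [show ((PySem.List.pyRange 0 cols 1).foldl (fun st y =>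
            if pvCell grid x y = 1 then
              pvDirs.foldl (stepA grid rows cols x y 1) (pvMark st.1 x.toNat y.toNat, st.2)
            else st) (v, acc.map (pvTag 1))) = _ from pv_seed_inner grid rows cols x _ v acc]
      exact ih _ _
  have := main (PySem.List.pyRange 0 rows 1) v0 []
  simpa using this

-- within one BFS layer: A's queue `rem@d ++ nxt@(d+1)` is processed exactly like the level fold over rem
theorem pv_IL (grid : List (List Int)) (rows cols : Int) (rem : List (Int × Int)) :
    ∀ (nxt : List (Int × Int)) (vis : List (List Bool)) (d : Int),
    loopA grid rows cols vis d (rem.map (pvTag d) ++ nxt.map (pvTag (d + 1))) =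
      loopA grid rows cols (levelFoldL grid rows cols (vis, nxt) rem).1 d
        ((levelFoldL grid rows cols (vis, nxt) rem).2.map (pvTag (d + 1))) := by
  induction rem with
  | nil => intro nxt vis d; simp [levelFoldL]
  | cons p rest ih =>
    intro nxt vis d
    have hpop : (p :: rest).map (pvTag d) ++ nxt.map (pvTag (d + 1)) =
        (p.1, p.2, d) :: (rest.map (pvTag d) ++ nxt.map (pvTag (d + 1))) := by simp [pvTag]
    rw [hpop, loopA]
    simp only [max_self]
    rw [show expandA grid rows cols p.1 p.2 (d + 1) (vis, rest.map (pvTag d) ++ nxt.map (pvTag (d + 1))) =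
          _ from pv_accA grid rows cols p.1 p.2 (d + 1) pvDirs vis _]
    rw [show (pvDirs.foldl (stepA grid rows cols p.1 p.2 (d + 1)) (vis, [])) =
          _ from pv_cellAL grid rows cols p.1 p.2 (d + 1) pvDirs vis []]
    have hq : (rest.map (pvTag d) ++ nxt.map (pvTag (d + 1))) ++
          ((pvDirs.foldl (stepL grid rows cols p.1 p.2) (vis, [])).2.map (pvTag (d + 1))) =
        rest.map (pvTag d) ++
          ((nxt ++ (pvDirs.foldl (stepL grid rows cols p.1 p.2) (vis, [])).2).map (pvTag (d + 1))) := by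
      simp
    simp only [hq]
    rw [ih _ _ d]
    have hB : levelFoldL grid rows cols (vis, nxt) (p :: rest) =
        levelFoldL grid rows cols
          ((pvDirs.foldl (stepL grid rows cols p.1 p.2) (vis, [])).1,
            nxt ++ (pvDirs.foldl (stepL grid rows cols p.1 p.2) (vis, [])).2) rest := by
      unfold levelFoldL
      simp only [List.foldl_cons]
      rw [pv_accL grid rows cols p.1 p.2 pvDirs vis nxt]
    rw [hB]

-- the outer correspondence: A's max-of-popped-distances equals the level counter
theorem pv_OL (grid : List (List Int)) (rows cols : Int) (n : Nat) :
    ∀ (vis : List (List Bool)) (dist : Int) (level : List (Int × Int)),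
      2 * pvCF vis + level.length ≤ n → 0 ≤ dist →
      loopA grid rows cols vis (if dist = 0 then -1 else dist) (level.map (pvTag (dist + 1))) =
        (if 0 < loopLvl grid rows cols vis dist level then loopLvl grid rows cols vis dist level else -1) := by
  induction n with
  | zero =>
    intro vis dist level hle hd
    have : level = [] := by
      cases level with
      | nil => rfl
      | cons p rest => simp at hle
    subst this
    rw [loopLvl]
    simp only [List.map_nil, loopA]
    split_ifs <;> omega
  | succ n ih =>
    intro vis dist level hle hd
    cases level with
    | nil =>
      rw [loopLvl]
      simp only [List.map_nil, loopA]
      split_ifs <;> omega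
    | cons p rest =>
      have hpop : (p :: rest).map (pvTag (dist + 1)) =
          (p.1, p.2, dist + 1) :: rest.map (pvTag (dist + 1)) := by simp [pvTag]
      rw [hpop, loopA]
      have hmax : max (if dist = 0 then -1 else dist) (dist + 1) = dist + 1 := by
        split_ifs <;> omega
      rw [hmax]
      rw [show expandA grid rows cols p.1 p.2 (dist + 1 + 1) (vis, rest.map (pvTag (dist + 1))) =
            _ from pv_accA grid rows cols p.1 p.2 (dist + 1 + 1) pvDirs vis _]
      rw [show (pvDirs.foldl (stepA grid rows cols p.1 p.2 (dist + 1 + 1)) (vis, [])) =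
            _ from pv_cellAL grid rows cols p.1 p.2 (dist + 1 + 1) pvDirs vis []]
      have hIL := pv_IL grid rows cols rest
          ((pvDirs.foldl (stepL grid rows cols p.1 p.2) (vis, [])).2)
          ((pvDirs.foldl (stepL grid rows cols p.1 p.2) (vis, [])).1) (dist + 1)
      rw [show (rest.map (pvTag (dist + 1)) ++
            ((pvDirs.foldl (stepL grid rows cols p.1 p.2) (vis, [])).2.map (pvTag (dist + 1 + 1)))) =
          (rest.map (pvTag (dist + 1)) ++
            (((pvDirs.foldl (stepL grid rows cols p.1 p.2) (vis, [])).2).map (pvTag ((dist + 1) + 1)))) from rfl]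
      rw [hIL]
      have hS : levelFoldL grid rows cols
            ((pvDirs.foldl (stepL grid rows cols p.1 p.2) (vis, [])).1,
              (pvDirs.foldl (stepL grid rows cols p.1 p.2) (vis, [])).2) rest =
          levelFoldL grid rows cols (vis, []) (p :: rest) := by
        unfold levelFoldL
        simp only [List.foldl_cons]
      rw [hS]
      have hmeas := pv_measL_cells grid rows cols (p :: rest) (vis, ([] : List (Int × Int)))
      have hrec := ih (levelFoldL grid rows cols (vis, []) (p :: rest)).1 (dist + 1)
          (levelFoldL grid rows cols (vis, []) (p :: rest)).2
          (by simp at hmeas hle ⊢; omega) (by omega)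
      have hne : ¬ (dist + 1 = 0) := by omega
      rw [if_neg hne] at hrec
      rw [hrec]
      rw [show loopLvl grid rows cols vis dist (p :: rest) =
            loopLvl grid rows cols (levelFoldL grid rows cols (vis, []) (p :: rest)).1 (dist + 1)
              (levelFoldL grid rows cols (vis, []) (p :: rest)).2 from by rw [loopLvl]]


-- ---- matrices, bounds, entry lemmas ----
def pvInb (rows cols x y : Int) : Prop := 0 ≤ x ∧ x < rows ∧ 0 ≤ y ∧ y < cols

def pvShape (rows cols : Int) (v : List (List Bool)) : Prop :=
  v.length = rows.toNat ∧ ∀ r ∈ v, r.length = cols.toNat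

theorem pv_getD_lt {a : Type} (l : List a) (d : a) {i : Nat} (h : i < l.length) :
    l.getD i d = l[i] := List.getD_eq_getElem l d h

theorem pv_getD_ge {a : Type} (l : List a) (d : a) {i : Nat} (h : l.length ≤ i) :
    l.getD i d = d := List.getD_eq_default l d (by omega)

theorem pv_vis_eq {rows cols : Int} {v : List (List Bool)} {x y : Int}
    (hs : pvShape rows cols v) (hi : pvInb rows cols x y) :
    pvVis? v x y = some (pvGetB v x y) := by
  obtain ⟨hl, hr⟩ := hs
  obtain ⟨hx0, hxr, hy0, hyc⟩ := hi
  have hx : x.toNat < v.length := by omega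
  have hy : y.toNat < (v[x.toNat]).length := by
    have := hr _ (List.getElem_mem hx); omega
  simp only [pvVis?, List.getElem?_eq_getElem hx]
  rw [List.getElem?_eq_getElem hy]
  unfold pvGetB
  rw [pv_getD_lt _ _ hx, pv_getD_lt _ _ hy]

theorem pv_shape_mark {rows cols : Int} {v : List (List Bool)} (a b : Nat)
    (hs : pvShape rows cols v) : pvShape rows cols (pvMark v a b) := by
  obtain ⟨hl, hr⟩ := hs
  by_cases ha : a < v.length
  · refine ⟨by simp [pvMark, hl], ?_⟩
    intro r hrm
    rcases List.mem_or_eq_of_mem_set hrm with h | h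
    · exact hr r h
    · have h1 : v.getD a [] = v[a] := pv_getD_lt _ _ ha
      have := hr _ (List.getElem_mem ha)
      subst h
      rw [h1]
      simpa using this
  · have : pvMark v a b = v := List.set_eq_of_length_le (by omega)
    rw [this]; exact ⟨hl, hr⟩

theorem pv_getB_mark_self {rows cols : Int} {v : List (List Bool)} {a b : Int}
    (hs : pvShape rows cols v) (hi : pvInb rows cols a b) :
    pvGetB (pvMark v a.toNat b.toNat) a b = true := by
  obtain ⟨hl, hr⟩ := hs
  obtain ⟨ha0, har, hb0, hbc⟩ := hi
  have ha : a.toNat < v.length := by omega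
  have hrow : v.getD a.toNat [] = v[a.toNat] := pv_getD_lt _ _ ha
  have hb : b.toNat < (v.getD a.toNat []).length := by
    rw [hrow]
    have := hr _ (List.getElem_mem ha); omega
  have h1 : (pvMark v a.toNat b.toNat).getD a.toNat [] = (v.getD a.toNat []).set b.toNat true := by
    unfold pvMark
    rw [pv_getD_lt _ _ (by simpa using ha), List.getElem_set_self]
  unfold pvGetB
  rw [h1, pv_getD_lt _ _ (by simpa using hb), List.getElem_set_self]

theorem pv_getB_mark_other {v : List (List Bool)} {a b x y : Int}
    (ha0 : 0 ≤ a) (hb0 : 0 ≤ b) (hx0 : 0 ≤ x) (hy0 : 0 ≤ y)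
    (hne : ¬(x = a ∧ y = b)) :
    pvGetB (pvMark v a.toNat b.toNat) x y = pvGetB v x y := by
  have hrowlem : ∀ (r : List Bool) (j k : Nat), j ≠ k → (r.set k true).getD j false = r.getD j false := by
    intro r j k hjk
    rw [List.getD_eq_getElem?_getD, List.getD_eq_getElem?_getD, List.getElem?_set_ne (by omega)]
  unfold pvGetB pvMark
  by_cases hxa : x.toNat = a.toNat
  · have hyb : y.toNat ≠ b.toNat := by omega
    by_cases hlt : a.toNat < v.length
    · have h1 : (v.set a.toNat ((v.getD a.toNat []).set b.toNat true)).getD x.toNat [] =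
          (v.getD a.toNat []).set b.toNat true := by
        rw [hxa, pv_getD_lt _ _ (by simpa using hlt), List.getElem_set_self]
      rw [h1, hrowlem _ _ _ hyb, hxa]
    · rw [List.set_eq_of_length_le (by omega)]
  · have h1 : (v.set a.toNat ((v.getD a.toNat []).set b.toNat true)).getD x.toNat [] =
        v.getD x.toNat [] := by
      rw [List.getD_eq_getElem?_getD, List.getElem?_set_ne (by omega),
        ← List.getD_eq_getElem?_getD]
    rw [h1]

theorem pv_mat_ext {rows cols : Int} {v w : List (List Bool)}
    (hv : pvShape rows cols v) (hw : pvShape rows cols w)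
    (h : ∀ x y : Int, pvInb rows cols x y → pvGetB v x y = pvGetB w x y) : v = w := by
  obtain ⟨hvl, hvr⟩ := hv
  obtain ⟨hwl, hwr⟩ := hw
  apply List.ext_getElem (by omega)
  intro i hi hi'
  have hiv : v[i] ∈ v := List.getElem_mem hi
  have hiw : w[i] ∈ w := List.getElem_mem hi'
  apply List.ext_getElem (by rw [hvr _ hiv, hwr _ hiw])
  intro j hj hj'
  have hrows : (i : Int) < rows := by have : i < rows.toNat := by omega
                                      omega
  have hcols : (j : Int) < cols := by
    have : j < cols.toNat := by rw [hvr _ hiv] at hj; omega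
    omega
  have := h i j ⟨by omega, hrows, by omega, hcols⟩
  unfold pvGetB at this
  rw [Int.toNat_natCast, Int.toNat_natCast, pv_getD_lt _ _ hi, pv_getD_lt _ _ hi',
    pv_getD_lt _ _ hj, pv_getD_lt _ _ hj'] at this
  exact this

theorem pv_shape_mk {rows cols : Int} (f : Int → Int → Bool) :
    pvShape rows cols ((PySem.List.pyRange 0 rows 1).map (fun x =>
      (PySem.List.pyRange 0 cols 1).map (fun y => f x y))) := by
  constructor
  · simp [PySem.List.length_pyRange_one]
  · intro r hrm
    rcases List.mem_map.1 hrm with ⟨x, _, rfl⟩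
    simp [PySem.List.length_pyRange_one]

theorem pv_getB_mk {rows cols : Int} (f : Int → Int → Bool) {x y : Int}
    (hi : pvInb rows cols x y) :
    pvGetB ((PySem.List.pyRange 0 rows 1).map (fun x =>
      (PySem.List.pyRange 0 cols 1).map (fun y => f x y))) x y = f x y := by
  obtain ⟨hx0, hxr, hy0, hyc⟩ := hi
  have hx : x.toNat < (PySem.List.pyRange 0 rows 1).length := by
    rw [PySem.List.length_pyRange_one]; omega
  have hy : y.toNat < (PySem.List.pyRange 0 cols 1).length := by
    rw [PySem.List.length_pyRange_one]; omega
  unfold pvGetB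
  have hrow : ((PySem.List.pyRange 0 rows 1).map (fun x =>
      (PySem.List.pyRange 0 cols 1).map (fun y => f x y))).getD x.toNat [] =
      (PySem.List.pyRange 0 cols 1).map (fun y => f ((PySem.List.pyRange 0 rows 1)[x.toNat]'hx) y) := by
    rw [pv_getD_lt _ _ (by rw [List.length_map]; exact hx)]
    rw [List.getElem_map]
  rw [hrow]
  rw [pv_getD_lt _ _ (by rw [List.length_map]; exact hy)]
  rw [List.getElem_map]
  rw [PySem.List.getElem_pyRange_one, PySem.List.getElem_pyRange_one]
  rw [show ((0 : Int) + (x.toNat : Int)) = x by omega, show ((0 : Int) + (y.toNat : Int)) = y by omega]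

theorem pv_getB_replicate (rows cols : Nat) (x y : Int) :
    pvGetB (List.replicate rows (List.replicate cols false)) x y = false := by
  unfold pvGetB
  by_cases hx : x.toNat < rows
  · have h1 : (List.replicate rows (List.replicate cols false)).getD x.toNat [] =
        List.replicate cols false := by
      rw [pv_getD_lt _ _ (by rw [List.length_replicate]; exact hx), List.getElem_replicate]
    rw [h1]
    by_cases hy : y.toNat < cols
    · rw [pv_getD_lt _ _ (by rw [List.length_replicate]; exact hy), List.getElem_replicate]
    · rw [pv_getD_ge _ _ (by rw [List.length_replicate]; omega)]
  · have h1 : (List.replicate rows (List.replicate cols false)).getD x.toNat [] = [] :=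
      pv_getD_ge _ _ (by rw [List.length_replicate]; omega)
    rw [h1]
    simp

theorem pv_shape_replicate (rows cols : Int) :
    pvShape rows cols (List.replicate rows.toNat (List.replicate cols.toNat false)) := by
  constructor
  · simp
  · intro r hrm
    rw [List.eq_of_mem_replicate hrm]
    simp

theorem pv_dirs_neg : ∀ d ∈ pvDirs, ((-d.1, -d.2) : Int × Int) ∈ pvDirs := by
  intro d hd
  fin_cases hd <;> simp [pvDirs]

-- ---- characterisation of the direction fold ----
theorem pv_bfalse {b : Bool} (h : ¬ b = true) : b = false := by
  cases b
  · rfl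
  · exact absurd rfl h

theorem pv_bool_ext {a b : Bool} (h : (a = true) ↔ (b = true)) : a = b := by
  cases a <;> cases b <;> simp_all

theorem pv_pair_eq {q : Int × Int} {a b : Int} (h1 : q.1 = a) (h2 : q.2 = b) : q = (a, b) := by
  cases q
  simp_all

theorem pv_mark_iff {rows cols : Int} {v : List (List Bool)} {a b : Int}
    (hs : pvShape rows cols v) (hi : pvInb rows cols a b)
    {x y : Int} (hx : 0 ≤ x) (hy : 0 ≤ y) :
    (pvGetB (pvMark v a.toNat b.toNat) x y = true ↔
      (pvGetB v x y = true ∨ (x = a ∧ y = b))) := by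
  by_cases hxy : x = a ∧ y = b
  · have ht : pvGetB (pvMark v a.toNat b.toNat) x y = true := by
      rw [hxy.1, hxy.2]; exact pv_getB_mark_self hs hi
    constructor
    · intro _
      exact Or.inr hxy
    · intro _
      exact ht
  · rw [pv_getB_mark_other hi.1 hi.2.2.1 hx hy hxy]
    simp [hxy]

theorem pv_mark_false_iff {rows cols : Int} {v : List (List Bool)} {a b : Int}
    (hs : pvShape rows cols v) (hi : pvInb rows cols a b)
    {x y : Int} (hx : 0 ≤ x) (hy : 0 ≤ y) :
    (pvGetB (pvMark v a.toNat b.toNat) x y = false ↔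
      (pvGetB v x y = false ∧ ¬(x = a ∧ y = b))) := by
  have h := pv_mark_iff hs hi hx hy (v := v)
  constructor
  · intro h0
    have hnt : ¬ (pvGetB (pvMark v a.toNat b.toNat) x y = true) := by simp [h0]
    rw [h] at hnt
    exact ⟨pv_bfalse (fun hE => hnt (Or.inl hE)), fun hxy => hnt (Or.inr hxy)⟩
  · rintro ⟨h1, h2⟩
    apply pv_bfalse
    rw [h]
    rintro (hE | hxy)
    · rw [h1] at hE
      cases hE
    · exact h2 hxy

theorem pv_dirchar (grid : List (List Int)) (rows cols px py : Int) (ds : List (Int × Int)) :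
    ∀ (v : List (List Bool)) (out : List (Int × Int)), pvShape rows cols v →
      pvShape rows cols (ds.foldl (stepL grid rows cols px py) (v, out)).1 ∧
      (∀ x y : Int, 0 ≤ x → 0 ≤ y →
        (pvGetB (ds.foldl (stepL grid rows cols px py) (v, out)).1 x y = true ↔
          pvGetB v x y = true ∨
            (pvInb rows cols x y ∧ pvCell grid x y = 0 ∧ ∃ d ∈ ds, x = px + d.1 ∧ y = py + d.2))) ∧
      (∀ q : Int × Int, q ∈ (ds.foldl (stepL grid rows cols px py) (v, out)).2 ↔ q ∈ out ∨
          (pvInb rows cols q.1 q.2 ∧ pvCell grid q.1 q.2 = 0 ∧ pvGetB v q.1 q.2 = false ∧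
            ∃ d ∈ ds, q.1 = px + d.1 ∧ q.2 = py + d.2)) := by
  induction ds with
  | nil =>
    intro v out hs
    refine ⟨hs, ?_, ?_⟩
    · intro x y _ _
      simp
    · intro q
      simp
  | cons d0 ds ih =>
    intro v out hs
    simp only [List.foldl_cons]
    by_cases h : 0 ≤ px + d0.1 ∧ px + d0.1 < rows ∧ 0 ≤ py + d0.2 ∧ py + d0.2 < cols ∧
        pvVis? v (px + d0.1) (py + d0.2) = some false ∧ pvCell grid (px + d0.1) (py + d0.2) = 0
    · have hinb0 : pvInb rows cols (px + d0.1) (py + d0.2) := ⟨h.1, h.2.1, h.2.2.1, h.2.2.2.1⟩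
      have hB0 : pvGetB v (px + d0.1) (py + d0.2) = false := by
        have hv := pv_vis_eq hs hinb0
        have h5 := h.2.2.2.2.1
        rw [hv] at h5
        exact Option.some_inj.mp h5
      rw [show stepL grid rows cols px py (v, out) d0 =
            (pvMark v (px + d0.1).toNat (py + d0.2).toNat, out ++ [(px + d0.1, py + d0.2)]) from by
          simp only [stepL, if_pos h]]
      obtain ⟨ihs, ihe, ihm⟩ := ih (pvMark v (px + d0.1).toNat (py + d0.2).toNat)
        (out ++ [(px + d0.1, py + d0.2)]) (pv_shape_mark _ _ hs)
      refine ⟨ihs, ?_, ?_⟩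
      · intro x y hx hy
        rw [ihe x y hx hy, pv_mark_iff hs hinb0 hx hy]
        constructor
        · rintro ((hv | he) | ⟨hi2, hw2, d, hd, he2⟩)
          · exact Or.inl hv
          · refine Or.inr ⟨by rw [he.1, he.2]; exact hinb0, by rw [he.1, he.2]; exact h.2.2.2.2.2,
              d0, List.mem_cons_self, he⟩
          · exact Or.inr ⟨hi2, hw2, d, List.mem_cons_of_mem _ hd, he2⟩
        · rintro (hv | ⟨hi2, hw2, d, hd, he2⟩)
          · exact Or.inl (Or.inl hv)
          · rcases List.mem_cons.mp hd with rfl | hd'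
            · exact Or.inl (Or.inr he2)
            · exact Or.inr ⟨hi2, hw2, d, hd', he2⟩
      · intro q
        rw [ihm q]
        constructor
        · rintro (hqo | ⟨hi2, hw2, hb2, d, hd, he2⟩)
          · rcases List.mem_append.mp hqo with hqo' | hqn
            · exact Or.inl hqo'
            · have hq : q = (px + d0.1, py + d0.2) := List.mem_singleton.mp hqn
              refine Or.inr ⟨by rw [hq]; exact hinb0, by rw [hq]; exact h.2.2.2.2.2,
                by rw [hq]; exact hB0, d0, List.mem_cons_self, by rw [hq]; exact ⟨rfl, rfl⟩⟩
          · have hb2' := (pv_mark_false_iff hs hinb0 hi2.1 hi2.2.2.1).mp hb2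
            exact Or.inr ⟨hi2, hw2, hb2'.1, d, List.mem_cons_of_mem _ hd, he2⟩
        · rintro (hqo | ⟨hi2, hw2, hb2, d, hd, he2⟩)
          · exact Or.inl (List.mem_append.mpr (Or.inl hqo))
          · by_cases hq : q.1 = px + d0.1 ∧ q.2 = py + d0.2
            · exact Or.inl (List.mem_append.mpr (Or.inr (List.mem_singleton.mpr
                (pv_pair_eq hq.1 hq.2))))
            · rcases List.mem_cons.mp hd with rfl | hd'
              · exact absurd he2 hq
              · refine Or.inr ⟨hi2, hw2, ?_, d, hd', he2⟩
                rw [pv_mark_false_iff hs hinb0 hi2.1 hi2.2.2.1]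
                exact ⟨hb2, hq⟩
    · rw [show stepL grid rows cols px py (v, out) d0 = (v, out) from by
          simp only [stepL, if_neg h]]
      obtain ⟨ihs, ihe, ihm⟩ := ih v out hs
      have hng : ∀ x y : Int, pvInb rows cols x y → pvCell grid x y = 0 →
          x = px + d0.1 → y = py + d0.2 → pvGetB v x y = true := by
        intro x y hi2 hw2 hex hey
        by_contra hbv
        apply h
        subst hex
        subst hey
        refine ⟨hi2.1, hi2.2.1, hi2.2.2.1, hi2.2.2.2, ?_, hw2⟩
        rw [pv_vis_eq hs hi2, pv_bfalse hbv]
      refine ⟨ihs, ?_, ?_⟩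
      · intro x y hx hy
        rw [ihe x y hx hy]
        constructor
        · rintro (hv | ⟨hi2, hw2, d, hd, he2⟩)
          · exact Or.inl hv
          · exact Or.inr ⟨hi2, hw2, d, List.mem_cons_of_mem _ hd, he2⟩
        · rintro (hv | ⟨hi2, hw2, d, hd, he2⟩)
          · exact Or.inl hv
          · rcases List.mem_cons.mp hd with rfl | hd'
            · exact Or.inl (hng x y hi2 hw2 he2.1 he2.2)
            · exact Or.inr ⟨hi2, hw2, d, hd', he2⟩
      · intro q
        rw [ihm q]
        constructor
        · rintro (hqo | ⟨hi2, hw2, hb2, d, hd, he2⟩)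
          · exact Or.inl hqo
          · exact Or.inr ⟨hi2, hw2, hb2, d, List.mem_cons_of_mem _ hd, he2⟩
        · rintro (hqo | ⟨hi2, hw2, hb2, d, hd, he2⟩)
          · exact Or.inl hqo
          · rcases List.mem_cons.mp hd with rfl | hd'
            · exact absurd (hng q.1 q.2 hi2 hw2 he2.1 he2.2) (by simp [hb2])
            · exact Or.inr ⟨hi2, hw2, hb2, d, hd', he2⟩

-- ---- characterisation of the level fold ----
theorem pv_foldchar (grid : List (List Int)) (rows cols : Int) (cells : List (Int × Int)) :
    ∀ (v : List (List Bool)) (out : List (Int × Int)), pvShape rows cols v →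
      pvShape rows cols (levelFoldL grid rows cols (v, out) cells).1 ∧
      (∀ x y : Int, 0 ≤ x → 0 ≤ y →
        (pvGetB (levelFoldL grid rows cols (v, out) cells).1 x y = true ↔
          pvGetB v x y = true ∨
            (pvInb rows cols x y ∧ pvCell grid x y = 0 ∧
              ∃ d ∈ pvDirs, ∃ p ∈ cells, x = p.1 + d.1 ∧ y = p.2 + d.2))) ∧
      (∀ q : Int × Int, q ∈ (levelFoldL grid rows cols (v, out) cells).2 ↔ q ∈ out ∨
          (pvInb rows cols q.1 q.2 ∧ pvCell grid q.1 q.2 = 0 ∧ pvGetB v q.1 q.2 = false ∧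
            ∃ d ∈ pvDirs, ∃ p ∈ cells, q.1 = p.1 + d.1 ∧ q.2 = p.2 + d.2)) := by
  induction cells with
  | nil =>
    intro v out hs
    refine ⟨by simpa [levelFoldL] using hs, ?_, ?_⟩
    · intro x y _ _; simp [levelFoldL]
    · intro q; simp [levelFoldL]
  | cons p cells ih =>
    intro v out hs
    have hstep : levelFoldL grid rows cols (v, out) (p :: cells) =
        levelFoldL grid rows cols
          ((pvDirs.foldl (stepL grid rows cols p.1 p.2) (v, out)).1,
           (pvDirs.foldl (stepL grid rows cols p.1 p.2) (v, out)).2) cells := by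
      simp [levelFoldL]
    obtain ⟨ds_s, ds_e, ds_m⟩ := pv_dirchar grid rows cols p.1 p.2 pvDirs v out hs
    obtain ⟨ihs, ihe, ihm⟩ := ih (pvDirs.foldl (stepL grid rows cols p.1 p.2) (v, out)).1
      (pvDirs.foldl (stepL grid rows cols p.1 p.2) (v, out)).2 ds_s
    rw [hstep]
    refine ⟨ihs, ?_, ?_⟩
    · intro x y hx hy
      rw [ihe x y hx hy, ds_e x y hx hy]
      constructor
      · rintro ((hv | ⟨hi2, hw2, d, hd, he2⟩) | ⟨hi2, hw2, d, hd, p', hp', he2⟩)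
        · exact Or.inl hv
        · exact Or.inr ⟨hi2, hw2, d, hd, p, List.mem_cons_self, he2⟩
        · exact Or.inr ⟨hi2, hw2, d, hd, p', List.mem_cons_of_mem _ hp', he2⟩
      · rintro (hv | ⟨hi2, hw2, d, hd, p', hp', he2⟩)
        · exact Or.inl (Or.inl hv)
        · rcases List.mem_cons.mp hp' with rfl | hp''
          · exact Or.inl (Or.inr ⟨hi2, hw2, d, hd, he2⟩)
          · exact Or.inr ⟨hi2, hw2, d, hd, p', hp'', he2⟩
    · intro q
      rw [ihm q, ds_m q]
      constructor
      · rintro ((hqo | ⟨hi2, hw2, hb2, d, hd, he2⟩) | ⟨hi2, hw2, hb1, d, hd, p', hp', he2⟩)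
        · exact Or.inl hqo
        · exact Or.inr ⟨hi2, hw2, hb2, d, hd, p, List.mem_cons_self, he2⟩
        · have hbv : pvGetB v q.1 q.2 = false := by
            apply pv_bfalse
            intro hE
            have ht := (ds_e q.1 q.2 hi2.1 hi2.2.2.1).mpr (Or.inl hE)
            rw [hb1] at ht
            cases ht
          exact Or.inr ⟨hi2, hw2, hbv, d, hd, p', List.mem_cons_of_mem _ hp', he2⟩
      · rintro (hqo | ⟨hi2, hw2, hbv, d, hd, p', hp', he2⟩)
        · exact Or.inl (Or.inl hqo)
        · by_cases hb1 : pvGetB (pvDirs.foldl (stepL grid rows cols p.1 p.2) (v, out)).1 q.1 q.2 = true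
          · rcases (ds_e q.1 q.2 hi2.1 hi2.2.2.1).mp hb1 with hE | ⟨hi3, hw3, d2, hd2, he3⟩
            · rw [hE] at hbv; cases hbv
            · exact Or.inl (Or.inr ⟨hi2, hw2, hbv, d2, hd2, he3⟩)
          · rcases List.mem_cons.mp hp' with rfl | hp''
            · exfalso
              apply hb1
              exact (ds_e q.1 q.2 hi2.1 hi2.2.2.1).mpr (Or.inr ⟨hi2, hw2, d, hd, he2⟩)
            · exact Or.inr ⟨hi2, hw2, pv_bfalse hb1, d, hd, p', hp'', he2⟩

-- ---- the BFS loop invariant ----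
def pvInv (grid : List (List Int)) (rows cols : Int) (v : List (List Bool))
    (lvl : List (Int × Int)) : Prop :=
  pvShape rows cols v ∧
  (∀ p ∈ lvl, pvInb rows cols p.1 p.2 ∧ pvCell grid p.1 p.2 = 0 ∧ pvGetB v p.1 p.2 = true) ∧
  (∀ x y : Int, pvInb rows cols x y → pvCell grid x y = 0 → pvGetB v x y = false →
     ∀ d ∈ pvDirs, pvInb rows cols (x + d.1) (y + d.2) →
       pvGetB v (x + d.1) (y + d.2) = true → (x + d.1, y + d.2) ∈ lvl)

theorem pv_getB_dilate (grid : List (List Int)) (rows cols : Int) (v : List (List Bool))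
    {x y : Int} (hi : pvInb rows cols x y) :
    pvGetB (dilate grid rows cols v) x y =
      (pvGetB v x y ||
        (decide (pvCell grid x y = 0) &&
          pvDirs.any (fun d =>
            decide (0 ≤ x + d.1) && decide (x + d.1 < rows) &&
            decide (0 ≤ y + d.2) && decide (y + d.2 < cols) &&
            pvGetB v (x + d.1) (y + d.2)))) := by
  exact pv_getB_mk _ hi

theorem pv_shape_dilate (grid : List (List Int)) (rows cols : Int) (v : List (List Bool)) :
    pvShape rows cols (dilate grid rows cols v) :=
  pv_shape_mk _

-- one BFS layer expansion IS one dilation step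
theorem pv_step (grid : List (List Int)) (rows cols : Int) (v : List (List Bool))
    (lvl : List (Int × Int)) (hinv : pvInv grid rows cols v lvl) :
    (levelFoldL grid rows cols (v, []) lvl).1 = dilate grid rows cols v ∧
    pvInv grid rows cols (levelFoldL grid rows cols (v, []) lvl).1
      (levelFoldL grid rows cols (v, []) lvl).2 ∧
    ((levelFoldL grid rows cols (v, []) lvl).2 = [] ↔
      (levelFoldL grid rows cols (v, []) lvl).1 = v) := by
  obtain ⟨hsh, hmemI, hclosed⟩ := hinv
  obtain ⟨fs, fe, fm⟩ := pv_foldchar grid rows cols lvl v [] hsh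
  have hdilE : ∀ x y : Int, pvInb rows cols x y →
      (pvGetB (dilate grid rows cols v) x y = true ↔
        pvGetB v x y = true ∨ (pvCell grid x y = 0 ∧
          ∃ d ∈ pvDirs, pvInb rows cols (x + d.1) (y + d.2) ∧
            pvGetB v (x + d.1) (y + d.2) = true)) := by
    intro x y hi
    rw [pv_getB_dilate grid rows cols v hi]
    simp only [Bool.or_eq_true, Bool.and_eq_true, List.any_eq_true, decide_eq_true_eq]
    constructor
    · rintro (hv | ⟨hw, d, hd, ⟨⟨⟨⟨h1, h2⟩, h3⟩, h4⟩, h5⟩⟩)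
      · exact Or.inl hv
      · exact Or.inr ⟨hw, d, hd, ⟨h1, h2, h3, h4⟩, h5⟩
    · rintro (hv | ⟨hw, d, hd, hbnd, h5⟩)
      · exact Or.inl hv
      · exact Or.inr ⟨hw, d, hd, ⟨⟨⟨⟨hbnd.1, hbnd.2.1⟩, hbnd.2.2.1⟩, hbnd.2.2.2⟩, h5⟩⟩
  have hadj : ∀ x y : Int, pvInb rows cols x y → pvCell grid x y = 0 → pvGetB v x y = false →
      ((∃ d ∈ pvDirs, ∃ p ∈ lvl, x = p.1 + d.1 ∧ y = p.2 + d.2) ↔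
       (∃ d ∈ pvDirs, pvInb rows cols (x + d.1) (y + d.2) ∧
         pvGetB v (x + d.1) (y + d.2) = true)) := by
    intro x y hi hw hb
    constructor
    · rintro ⟨d, hd, p, hp, he1, he2⟩
      obtain ⟨hpi, hpw, hpb⟩ := hmemI p hp
      have e1 : x + ((-d.1, -d.2) : Int × Int).1 = p.1 := by show x + -d.1 = p.1; omega
      have e2 : y + ((-d.1, -d.2) : Int × Int).2 = p.2 := by show y + -d.2 = p.2; omega
      refine ⟨(-d.1, -d.2), pv_dirs_neg d hd, ?_, ?_⟩
      · rw [e1, e2]; exact hpi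
      · rw [e1, e2]; exact hpb
    · rintro ⟨d, hd, hi2, hb2⟩
      have hlv := hclosed x y hi hw hb d hd hi2 hb2
      exact ⟨(-d.1, -d.2), pv_dirs_neg d hd, (x + d.1, y + d.2), hlv,
        by show x = (x + d.1) + -d.1; omega, by show y = (y + d.2) + -d.2; omega⟩
  refine ⟨?_, ?_, ?_⟩
  · apply pv_mat_ext fs (pv_shape_dilate grid rows cols v)
    intro x y hi
    apply pv_bool_ext
    rw [fe x y hi.1 hi.2.2.1, hdilE x y hi]
    constructor
    · rintro (hv | ⟨hi2, hw2, hAdj⟩)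
      · exact Or.inl hv
      · by_cases hb : pvGetB v x y = true
        · exact Or.inl hb
        · exact Or.inr ⟨hw2, (hadj x y hi hw2 (pv_bfalse hb)).mp hAdj⟩
    · rintro (hv | ⟨hw2, hAdj⟩)
      · exact Or.inl hv
      · by_cases hb : pvGetB v x y = true
        · exact Or.inl hb
        · exact Or.inr ⟨hi, hw2, (hadj x y hi hw2 (pv_bfalse hb)).mpr hAdj⟩
  · refine ⟨fs, ?_, ?_⟩
    · intro q hq
      rcases (fm q).mp hq with h0 | ⟨hi2, hw2, hb2, rest⟩
      · simp at h0
      · exact ⟨hi2, hw2, (fe q.1 q.2 hi2.1 hi2.2.2.1).mpr (Or.inr ⟨hi2, hw2, rest⟩)⟩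
    · intro x y hi hw hbr d hd hi2 hbr2
      have hbv : pvGetB v x y = false := by
        apply pv_bfalse
        intro hv
        have ht := (fe x y hi.1 hi.2.2.1).mpr (Or.inl hv)
        rw [hbr] at ht
        cases ht
      by_cases hv2 : pvGetB v (x + d.1) (y + d.2) = true
      · exfalso
        have hlv := hclosed x y hi hw hbv d hd hi2 hv2
        have ht := (fe x y hi.1 hi.2.2.1).mpr (Or.inr ⟨hi, hw, (-d.1, -d.2),
          pv_dirs_neg d hd, (x + d.1, y + d.2), hlv,
          by show x = (x + d.1) + -d.1; omega, by show y = (y + d.2) + -d.2; omega⟩)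
        rw [hbr] at ht
        cases ht
      · rcases (fe (x + d.1) (y + d.2) hi2.1 hi2.2.2.1).mp hbr2 with hE | ⟨hi3, hw3, rest⟩
        · exact absurd hE hv2
        · exact (fm (x + d.1, y + d.2)).mpr (Or.inr ⟨hi2, hw3, pv_bfalse hv2, rest⟩)
  · constructor
    · intro h2
      apply pv_mat_ext fs hsh
      intro x y hi
      apply pv_bool_ext
      rw [fe x y hi.1 hi.2.2.1]
      constructor
      · rintro (hv | ⟨hi2, hw2, rest⟩)
        · exact hv
        · by_cases hb : pvGetB v x y = true
          · exact hb
          · exfalso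
            have hm : (x, y) ∈ (levelFoldL grid rows cols (v, []) lvl).2 :=
              (fm (x, y)).mpr (Or.inr ⟨hi2, hw2, pv_bfalse hb, rest⟩)
            rw [h2] at hm
            simp at hm
      · exact fun hv => Or.inl hv
    · intro h1
      cases hr2 : (levelFoldL grid rows cols (v, []) lvl).2 with
      | nil => rfl
      | cons q qs =>
        exfalso
        have hq : q ∈ (levelFoldL grid rows cols (v, []) lvl).2 := by
          rw [hr2]; exact List.mem_cons_self
        rcases (fm q).mp hq with h0 | ⟨hi2, hw2, hb2, rest⟩
        · simp at h0
        · have ht := (fe q.1 q.2 hi2.1 hi2.2.2.1).mpr (Or.inr ⟨hi2, hw2, rest⟩)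
          rw [h1, hb2] at ht
          cases ht

-- ---- seed characterisation ----
def pvPlex (a b x y : Int) : Prop := x < a ∨ (x = a ∧ y < b)

def pvSInv (grid : List (List Int)) (rows cols : Int) (P : Int → Int → Prop)
    (st : List (List Bool) × List (Int × Int)) : Prop :=
  pvShape rows cols st.1 ∧
  (∀ x y : Int, 0 ≤ x → 0 ≤ y →
    (pvGetB st.1 x y = true ↔
      (pvInb rows cols x y ∧ P x y ∧ pvCell grid x y = 1) ∨
      (pvInb rows cols x y ∧ pvCell grid x y = 0 ∧
        ∃ d ∈ pvDirs, pvInb rows cols (x + d.1) (y + d.2) ∧ P (x + d.1) (y + d.2) ∧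
          pvCell grid (x + d.1) (y + d.2) = 1))) ∧
  (∀ q : Int × Int, q ∈ st.2 ↔
      pvInb rows cols q.1 q.2 ∧ pvCell grid q.1 q.2 = 0 ∧
        ∃ d ∈ pvDirs, pvInb rows cols (q.1 + d.1) (q.2 + d.2) ∧ P (q.1 + d.1) (q.2 + d.2) ∧
          pvCell grid (q.1 + d.1) (q.2 + d.2) = 1)

theorem pv_sinv_congr {grid : List (List Int)} {rows cols : Int} {P Q : Int → Int → Prop}
    {st : List (List Bool) × List (Int × Int)}
    (hpq : ∀ a b : Int, pvInb rows cols a b →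
      ((P a b ∧ pvCell grid a b = 1) ↔ (Q a b ∧ pvCell grid a b = 1)))
    (h : pvSInv grid rows cols P st) : pvSInv grid rows cols Q st := by
  obtain ⟨h1, h2, h3⟩ := h
  refine ⟨h1, ?_, ?_⟩
  · intro x y hx hy
    rw [h2 x y hx hy]
    constructor
    · rintro (⟨hi, hp, hc⟩ | ⟨hi, hc, d, hd, hi2, hp2, hc2⟩)
      · exact Or.inl ⟨hi, ((hpq x y hi).1 ⟨hp, hc⟩).1, hc⟩
      · exact Or.inr ⟨hi, hc, d, hd, hi2, ((hpq _ _ hi2).1 ⟨hp2, hc2⟩).1, hc2⟩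
    · rintro (⟨hi, hp, hc⟩ | ⟨hi, hc, d, hd, hi2, hp2, hc2⟩)
      · exact Or.inl ⟨hi, ((hpq x y hi).2 ⟨hp, hc⟩).1, hc⟩
      · exact Or.inr ⟨hi, hc, d, hd, hi2, ((hpq _ _ hi2).2 ⟨hp2, hc2⟩).1, hc2⟩
  · intro q
    rw [h3 q]
    constructor
    · rintro ⟨hi, hc, d, hd, hi2, hp2, hc2⟩
      exact ⟨hi, hc, d, hd, hi2, ((hpq _ _ hi2).1 ⟨hp2, hc2⟩).1, hc2⟩
    · rintro ⟨hi, hc, d, hd, hi2, hp2, hc2⟩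
      exact ⟨hi, hc, d, hd, hi2, ((hpq _ _ hi2).2 ⟨hp2, hc2⟩).1, hc2⟩

-- processing one scanned cell
theorem pv_scell (grid : List (List Int)) (rows cols cx cy : Int) {P : Int → Int → Prop}
    {st : List (List Bool) × List (Int × Int)}
    (hinv : pvSInv grid rows cols P st) (hi : pvInb rows cols cx cy) :
    pvSInv grid rows cols (fun a b => P a b ∨ (a = cx ∧ b = cy))
      (if pvCell grid cx cy = 1 then
        pvDirs.foldl (stepL grid rows cols cx cy) (pvMark st.1 cx.toNat cy.toNat, st.2)
      else st) := by
  obtain ⟨hsh, hent, hmem⟩ := hinv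
  by_cases hland : pvCell grid cx cy = 1
  · rw [if_pos hland]
    have hsm : pvShape rows cols (pvMark st.1 cx.toNat cy.toNat) := pv_shape_mark _ _ hsh
    obtain ⟨ds_s, ds_e, ds_m⟩ := pv_dirchar grid rows cols cx cy pvDirs
      (pvMark st.1 cx.toNat cy.toNat) st.2 hsm
    refine ⟨ds_s, ?_, ?_⟩
    · intro x y hx hy
      rw [ds_e x y hx hy, pv_mark_iff hsh hi hx hy, hent x y hx hy]
      constructor
      · rintro ((hold | heq) | ⟨hi2, hw2, d, hd, he2⟩)
        · rcases hold with ⟨hia, hp, hc⟩ | ⟨hia, hc, d, hd, hib, hp2, hc2⟩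
          · exact Or.inl ⟨hia, Or.inl hp, hc⟩
          · exact Or.inr ⟨hia, hc, d, hd, hib, Or.inl hp2, hc2⟩
        · exact Or.inl ⟨by rw [heq.1, heq.2]; exact hi, Or.inr heq,
            by rw [heq.1, heq.2]; exact hland⟩
        · have e1 : x + ((-d.1, -d.2) : Int × Int).1 = cx := by show x + -d.1 = cx; omega
          have e2 : y + ((-d.1, -d.2) : Int × Int).2 = cy := by show y + -d.2 = cy; omega
          refine Or.inr ⟨hi2, hw2, (-d.1, -d.2), pv_dirs_neg d hd, ?_, ?_, ?_⟩
          · rw [e1, e2]; exact hi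
          · rw [e1, e2]; exact Or.inr ⟨rfl, rfl⟩
          · rw [e1, e2]; exact hland
      · rintro (⟨hia, hp, hc⟩ | ⟨hia, hc, d, hd, hib, hp2, hc2⟩)
        · rcases hp with hp | heq
          · exact Or.inl (Or.inl (Or.inl ⟨hia, hp, hc⟩))
          · exact Or.inl (Or.inr heq)
        · rcases hp2 with hp2 | heq2
          · exact Or.inl (Or.inl (Or.inr ⟨hia, hc, d, hd, hib, hp2, hc2⟩))
          · refine Or.inr ⟨hia, hc, (-d.1, -d.2), pv_dirs_neg d hd, ?_, ?_⟩
            · show x = cx + -d.1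
              have := heq2.1
              omega
            · show y = cy + -d.2
              have := heq2.2
              omega
    · intro q
      rw [ds_m q, hmem q]
      constructor
      · rintro (hqo | ⟨hi2, hw2, hb2, d, hd, he2⟩)
        · rcases hqo with ⟨hia, hc, d, hd, hib, hp2, hc2⟩
          exact ⟨hia, hc, d, hd, hib, Or.inl hp2, hc2⟩
        · have e1 : q.1 + ((-d.1, -d.2) : Int × Int).1 = cx := by show q.1 + -d.1 = cx; omega
          have e2 : q.2 + ((-d.1, -d.2) : Int × Int).2 = cy := by show q.2 + -d.2 = cy; omega
          refine ⟨hi2, hw2, (-d.1, -d.2), pv_dirs_neg d hd, ?_, ?_, ?_⟩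
          · rw [e1, e2]; exact hi
          · rw [e1, e2]; exact Or.inr ⟨rfl, rfl⟩
          · rw [e1, e2]; exact hland
      · rintro ⟨hia, hc, d, hd, hib, hp2, hc2⟩
        rcases hp2 with hp2 | heq2
        · exact Or.inl ⟨hia, hc, d, hd, hib, hp2, hc2⟩
        · by_cases hq : pvGetB st.1 q.1 q.2 = true
          · rcases (hent q.1 q.2 hia.1 hia.2.2.1).mp hq with ⟨_, _, hcl⟩ | ⟨_, hcw, rest⟩
            · exfalso
              rw [hc] at hcl
              exact absurd hcl (by norm_num)
            · exact Or.inl ⟨hia, hc, rest⟩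
          · have hq' : pvGetB st.1 q.1 q.2 = false := pv_bfalse hq
            have hqne : ¬(q.1 = cx ∧ q.2 = cy) := by
              rintro ⟨e1, e2⟩
              rw [e1, e2, hland] at hc
              exact absurd hc (by norm_num)
            refine Or.inr ⟨hia, hc, ?_, (-d.1, -d.2), pv_dirs_neg d hd, ?_, ?_⟩
            · rw [pv_mark_false_iff hsh hi hia.1 hia.2.2.1]
              exact ⟨hq', hqne⟩
            · show q.1 = cx + -d.1
              have := heq2.1
              omega
            · show q.2 = cy + -d.2
              have := heq2.2
              omega
  · rw [if_neg hland]
    refine ⟨hsh, ?_, ?_⟩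
    · intro x y hx hy
      rw [hent x y hx hy]
      constructor
      · rintro (⟨hia, hp, hc⟩ | ⟨hia, hc, d, hd, hib, hp2, hc2⟩)
        · exact Or.inl ⟨hia, Or.inl hp, hc⟩
        · exact Or.inr ⟨hia, hc, d, hd, hib, Or.inl hp2, hc2⟩
      · rintro (⟨hia, hp, hc⟩ | ⟨hia, hc, d, hd, hib, hp2, hc2⟩)
        · rcases hp with hp | heq
          · exact Or.inl ⟨hia, hp, hc⟩
          · exfalso; apply hland; rw [← heq.1, ← heq.2]; exact hc
        · rcases hp2 with hp2 | heq2
          · exact Or.inr ⟨hia, hc, d, hd, hib, hp2, hc2⟩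
          · exfalso; apply hland; rw [← heq2.1, ← heq2.2]; exact hc2
    · intro q
      rw [hmem q]
      constructor
      · rintro ⟨hia, hc, d, hd, hib, hp2, hc2⟩
        exact ⟨hia, hc, d, hd, hib, Or.inl hp2, hc2⟩
      · rintro ⟨hia, hc, d, hd, hib, hp2, hc2⟩
        rcases hp2 with hp2 | heq2
        · exact ⟨hia, hc, d, hd, hib, hp2, hc2⟩
        · exfalso; apply hland; rw [← heq2.1, ← heq2.2]; exact hc2

theorem pv_srow (grid : List (List Int)) (rows cols cx : Int) (n : Nat) :
    ∀ (b : Int) (st : List (List Bool) × List (Int × Int)), 0 ≤ b → b + n = cols →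
      0 ≤ cx → cx < rows → pvSInv grid rows cols (pvPlex cx b) st →
      pvSInv grid rows cols (pvPlex cx cols)
        ((PySem.List.pyRange b cols 1).foldl (fun st y =>
          if pvCell grid cx y = 1 then
            pvDirs.foldl (stepL grid rows cols cx y) (pvMark st.1 cx.toNat y.toNat, st.2)
          else st) st) := by
  induction n with
  | zero =>
    intro b st hb0 hbc hcx0 hcxr hinv
    have hb : b = cols := by omega
    rw [show PySem.List.pyRange b cols 1 = [] from PySem.List.pyRange_one_eq_nil (by omega)]
    rw [hb] at hinv
    exact hinv
  | succ n ih =>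
    intro b st hb0 hbc hcx0 hcxr hinv
    rw [show PySem.List.pyRange b cols 1 = b :: PySem.List.pyRange (b + 1) cols 1 from
      PySem.List.pyRange_one_cons (by omega)]
    simp only [List.foldl_cons]
    have hcell := pv_scell grid rows cols cx b hinv ⟨hcx0, hcxr, hb0, by omega⟩
    have hcong : pvSInv grid rows cols (pvPlex cx (b + 1))
        (if pvCell grid cx b = 1 then
          pvDirs.foldl (stepL grid rows cols cx b) (pvMark st.1 cx.toNat b.toNat, st.2)
        else st) := by
      refine pv_sinv_congr (fun u w _ => ?_) hcell
      unfold pvPlex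
      constructor
      · rintro ⟨hp, hc⟩
        refine ⟨?_, hc⟩
        rcases hp with (h | h) | h
        · exact Or.inl h
        · exact Or.inr ⟨h.1, by omega⟩
        · exact Or.inr ⟨h.1, by omega⟩
      · rintro ⟨hp, hc⟩
        refine ⟨?_, hc⟩
        rcases hp with h | h
        · exact Or.inl (Or.inl h)
        · by_cases hw : w = b
          · exact Or.inr ⟨h.1, hw⟩
          · exact Or.inl (Or.inr ⟨h.1, by omega⟩)
    exact ih (b + 1) _ (by omega) (by omega) hcx0 hcxr hcong

theorem pv_souter (grid : List (List Int)) (rows cols : Int) (n : Nat) :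
    ∀ (a : Int) (st : List (List Bool) × List (Int × Int)), 0 ≤ a → a + n = rows →
      pvSInv grid rows cols (pvPlex a 0) st →
      pvSInv grid rows cols (pvPlex rows 0)
        ((PySem.List.pyRange a rows 1).foldl (fun st x =>
          (PySem.List.pyRange 0 cols 1).foldl (fun st y =>
            if pvCell grid x y = 1 then
              pvDirs.foldl (stepL grid rows cols x y) (pvMark st.1 x.toNat y.toNat, st.2)
            else st) st) st) := by
  induction n with
  | zero =>
    intro a st ha0 har hinv
    have ha : a = rows := by omega
    rw [show PySem.List.pyRange a rows 1 = [] from PySem.List.pyRange_one_eq_nil (by omega)]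
    rw [ha] at hinv
    exact hinv
  | succ n ih =>
    intro a st ha0 har hinv
    rw [show PySem.List.pyRange a rows 1 = a :: PySem.List.pyRange (a + 1) rows 1 from
      PySem.List.pyRange_one_cons (by omega)]
    simp only [List.foldl_cons]
    have hrow : pvSInv grid rows cols (pvPlex a cols)
        ((PySem.List.pyRange 0 cols 1).foldl (fun st y =>
          if pvCell grid a y = 1 then
            pvDirs.foldl (stepL grid rows cols a y) (pvMark st.1 a.toNat y.toNat, st.2)
          else st) st) := by
      by_cases hc : 0 < cols
      · exact pv_srow grid rows cols a cols.toNat 0 st le_rfl (by omega) ha0 (by omega) hinv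
      · rw [show PySem.List.pyRange 0 cols 1 = [] from PySem.List.pyRange_one_eq_nil (by omega)]
        simp only [List.foldl_nil]
        refine pv_sinv_congr (fun u w hu => ?_) hinv
        exact absurd hu (by unfold pvInb; omega)
    have hcong : pvSInv grid rows cols (pvPlex (a + 1) 0)
        ((PySem.List.pyRange 0 cols 1).foldl (fun st y =>
          if pvCell grid a y = 1 then
            pvDirs.foldl (stepL grid rows cols a y) (pvMark st.1 a.toNat y.toNat, st.2)
          else st) st) := by
      refine pv_sinv_congr (fun u w hu => ?_) hrow
      unfold pvPlex
      unfold pvInb at hu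
      constructor
      · rintro ⟨hp, hc⟩
        exact ⟨by omega, hc⟩
      · rintro ⟨hp, hc⟩
        exact ⟨by omega, hc⟩
    exact ih (a + 1) _ (by omega) (by omega) hcong

theorem pv_seedchar (grid : List (List Int)) (rows cols : Int) (hr : 0 ≤ rows) :
    pvSInv grid rows cols (pvPlex rows 0) (seedL grid rows cols) := by
  unfold seedL
  have h0 : pvSInv grid rows cols (pvPlex 0 0)
      ((List.replicate rows.toNat (List.replicate cols.toNat false), ([] : List (Int × Int)))) := by
    refine ⟨pv_shape_replicate rows cols, ?_, ?_⟩
    · intro x y hx hy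
      rw [pv_getB_replicate]
      simp only [Bool.false_eq_true, false_iff]
      rintro (⟨hi, hp, _⟩ | ⟨hi, _, d, hd, hi2, hp, _⟩)
      · unfold pvPlex at hp
        unfold pvInb at hi
        omega
      · unfold pvPlex at hp
        unfold pvInb at hi2
        omega
    · intro q
      simp only [List.not_mem_nil, false_iff]
      rintro ⟨hi, _, d, hd, hi2, hp, _⟩
      unfold pvPlex at hp
      unfold pvInb at hi2
      omega
  exact pv_souter grid rows cols rows.toNat 0 _ (by omega) (by omega) h0

-- ---- counting lemmas for termination of the correspondence ----
theorem pv_ccf (l : List Bool) : (false :: l).count false = l.count false + 1 := by simp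
theorem pv_cct (l : List Bool) : (true :: l).count false = l.count false := by simp

theorem pv_row_mono : ∀ (r s : List Bool), r.length = s.length →
    (∀ i : Nat, r.getD i false = true → s.getD i false = true) →
    s.count false ≤ r.count false ∧ (s.count false = r.count false → s = r) := by
  intro r
  induction r with
  | nil =>
    intro s hl _
    cases s with
    | nil => exact ⟨le_rfl, fun _ => rfl⟩
    | cons c s' => simp at hl
  | cons a r ih =>
    intro s hl h
    cases s with
    | nil => simp at hl
    | cons c s' =>
      have h0 : a = true → c = true := fun ha => by
        have := h 0
        simpa [ha] using this
      obtain ⟨ht1, ht2⟩ := ih s' (by simpa using hl) (fun i => by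
        have := h (i + 1)
        simpa using this)
      cases a with
      | true =>
        cases c with
        | false => exact absurd (h0 rfl) (by simp)
        | true =>
          rw [pv_cct, pv_cct]
          exact ⟨ht1, fun hc => by rw [ht2 hc]⟩
      | false =>
        cases c with
        | true =>
          rw [pv_cct, pv_ccf]
          exact ⟨by omega, fun hc => absurd hc (by omega)⟩
        | false =>
          rw [pv_ccf, pv_ccf]
          exact ⟨by omega, fun hc => by rw [ht2 (by omega)]⟩

theorem pv_cf_mono : ∀ (v w : List (List Bool)), v.length = w.length →
    (∀ i : Nat, (v.getD i []).length = (w.getD i []).length) →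
    (∀ i j : Nat, (v.getD i []).getD j false = true → (w.getD i []).getD j false = true) →
    pvCF w ≤ pvCF v ∧ (pvCF w = pvCF v → w = v) := by
  intro v
  induction v with
  | nil =>
    intro w hl _ _
    cases w with
    | nil => exact ⟨le_rfl, fun _ => rfl⟩
    | cons s w' => simp at hl
  | cons r v ih =>
    intro w hl hlen hent
    cases w with
    | nil => simp at hl
    | cons s w' =>
      have hrow := pv_row_mono r s (by have := hlen 0; simpa using this)
        (fun j => by have := hent 0 j; simpa using this)
      have htl := ih w' (by simpa using hl)
        (fun i => by have := hlen (i + 1); simpa using this)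
        (fun i j => by have := hent (i + 1) j; simpa using this)
      constructor
      · simp only [pvCF, List.map_cons, List.sum_cons] at *
        omega
      · intro hc
        simp only [pvCF, List.map_cons, List.sum_cons] at hc htl hrow
        have h1 : s.count false = r.count false := by omega
        have h2 : (w'.map (fun r => r.count false)).sum = (v.map (fun r => r.count false)).sum := by omega
        rw [hrow.2 h1, htl.2 h2]

theorem pv_shape_entry_true {rows cols : Int} {v : List (List Bool)} (hs : pvShape rows cols v)
    {i j : Nat} (h : (v.getD i []).getD j false = true) :
    pvInb rows cols (i : Int) (j : Int) ∧ pvGetB v (i : Int) (j : Int) = true := by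
  obtain ⟨hl, hr⟩ := hs
  by_cases hi : i < v.length
  · have hrow : v.getD i [] = v[i] := pv_getD_lt _ _ hi
    by_cases hj : j < (v[i]).length
    · have hcols : j < cols.toNat := by
        have := hr _ (List.getElem_mem hi); omega
      refine ⟨by unfold pvInb; omega, ?_⟩
      unfold pvGetB
      rw [Int.toNat_natCast, Int.toNat_natCast, pv_getD_lt _ _ hi, pv_getD_lt _ _ hj]
      rw [hrow, pv_getD_lt _ _ hj] at h
      exact h
    · rw [hrow, pv_getD_ge (v[i]) false (by omega)] at h
      simp at h
  · rw [pv_getD_ge v [] (by omega)] at h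
    simp at h

theorem pv_cf_dilate (grid : List (List Int)) (rows cols : Int) {v : List (List Bool)}
    (hs : pvShape rows cols v) :
    pvCF (dilate grid rows cols v) ≤ pvCF v ∧
      (pvCF (dilate grid rows cols v) = pvCF v → dilate grid rows cols v = v) := by
  have hsd := pv_shape_dilate grid rows cols v
  obtain ⟨hvl, hvr⟩ := hs
  obtain ⟨hdl, hdr⟩ := hsd
  apply pv_cf_mono
  · omega
  · intro i
    by_cases hi : i < rows.toNat
    · have hi1 : i < v.length := by omega
      have hi2 : i < (dilate grid rows cols v).length := by omega
      rw [pv_getD_lt _ _ hi1, pv_getD_lt _ _ hi2,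
        hvr _ (List.getElem_mem hi1), hdr _ (List.getElem_mem hi2)]
    · rw [pv_getD_ge _ _ (by omega), pv_getD_ge _ _ (by omega)]
  · intro i j h
    obtain ⟨hinb, hg⟩ := pv_shape_entry_true ⟨hvl, hvr⟩ h
    have hd : pvGetB (dilate grid rows cols v) (i : Int) (j : Int) = true := by
      rw [pv_getB_dilate grid rows cols v hinb, hg]
      simp
    unfold pvGetB at hd
    rw [Int.toNat_natCast, Int.toNat_natCast] at hd
    exact hd

theorem pv_full_fix (grid : List (List Int)) (rows cols : Int) {v : List (List Bool)}
    (hs : pvShape rows cols v) (hcf : pvCF v = 0) : dilate grid rows cols v = v := by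
  apply pv_mat_ext (pv_shape_dilate grid rows cols v) hs
  intro x y hi
  have hv : pvGetB v x y = true := by
    obtain ⟨hl, hr⟩ := hs
    obtain ⟨hx0, hxr, hy0, hyc⟩ := hi
    have hx : x.toNat < v.length := by omega
    have hmem : v[x.toNat] ∈ v := List.getElem_mem hx
    have hy : y.toNat < (v[x.toNat]).length := by have := hr _ hmem; omega
    have hcnt : (v[x.toNat]).count false = 0 := by
      have hmm : (v[x.toNat]).count false ∈ v.map (fun r => r.count false) :=
        List.mem_map_of_mem hmem
      have hle := List.single_le_sum (fun (x : Nat) _ => Nat.zero_le x) _ hmm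
      unfold pvCF at hcf
      omega
    have hnf : false ∉ v[x.toNat] := List.count_eq_zero.mp hcnt
    have helem : v[x.toNat][y.toNat] = true := by
      cases hE : v[x.toNat][y.toNat] with
      | false => exact absurd (by rw [← hE]; exact List.getElem_mem hy) hnf
      | true => rfl
    unfold pvGetB
    rw [pv_getD_lt _ _ hx, pv_getD_lt _ _ hy]
    exact helem
  rw [pv_getB_dilate grid rows cols v hi, hv]
  simp


theorem pv_cf_bound {rows cols : Int} {v : List (List Bool)} (hs : pvShape rows cols v) :
    pvCF v ≤ rows.toNat * cols.toNat := by
  obtain ⟨hl, hr⟩ := hs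
  have main : ∀ (w : List (List Bool)), (∀ r ∈ w, r.length = cols.toNat) →
      pvCF w ≤ w.length * cols.toNat := by
    intro w
    induction w with
    | nil => intro _; simp [pvCF]
    | cons r t ih =>
      intro hw
      have h1 : r.count false ≤ cols.toNat := by
        have h2 : r.count false ≤ r.length := List.count_le_length
        rw [hw r (List.mem_cons_self)] at h2
        exact h2
      have h2 := ih (fun r' hr' => hw r' (List.mem_cons_of_mem _ hr'))
      simp only [pvCF, List.map_cons, List.sum_cons, List.length_cons] at *
      calc r.count false + (t.map (fun r => r.count false)).sum
          ≤ cols.toNat + t.length * cols.toNat := by omega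
        _ = (t.length + 1) * cols.toNat := by ring
  rw [← hl]
  exact main v hr

-- ---- the main loop correspondence ----
theorem pv_loopcorr (grid : List (List Int)) (rows cols : Int) :
    ∀ (fuel : Nat) (prev v : List (List Bool)) (lvl : List (Int × Int)) (d : Int),
      pvShape rows cols prev → pvInv grid rows cols v lvl →
      v = dilate grid rows cols prev → (lvl = [] ↔ v = prev) → pvCF prev ≤ fuel →
      loopDil grid rows cols fuel prev d =
        (if 0 < loopLvl grid rows cols v d lvl then loopLvl grid rows cols v d lvl else -1) := by
  intro fuel
  induction fuel with
  | zero =>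
    intro prev v lvl d hsp hinv hdil hemp hcf
    have hfix : dilate grid rows cols prev = prev := pv_full_fix grid rows cols hsp (by omega)
    have hv : v = prev := by rw [hdil, hfix]
    have hl : lvl = [] := hemp.2 hv
    subst hl
    rw [loopLvl]
    rfl
  | succ n ih =>
    intro prev v lvl d hsp hinv hdil hemp hcf
    by_cases hv : v = prev
    · have hl : lvl = [] := hemp.2 hv
      subst hl
      rw [loopLvl]
      show (if dilate grid rows cols prev = prev then (if 0 < d then d else -1)
            else loopDil grid rows cols n (dilate grid rows cols prev) (d + 1)) = _
      rw [if_pos (by rw [← hdil, hv])]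
    · have hl : lvl ≠ [] := fun h => hv (hemp.1 h)
      cases lvl with
      | nil => exact absurd rfl hl
      | cons p rest =>
        obtain ⟨hstep1, hstep2, hstep3⟩ := pv_step grid rows cols v (p :: rest) hinv
        have hcflt : pvCF v < pvCF prev := by
          have hmono := pv_cf_dilate grid rows cols hsp
          rw [← hdil] at hmono
          rcases Nat.lt_or_ge (pvCF v) (pvCF prev) with h | h
          · exact h
          · exact absurd (hmono.2 (by omega)) hv
        have hrec := ih v _ _ (d + 1) hinv.1 hstep2 hstep1 ?_ (by omega)
        · rw [show loopLvl grid rows cols v d (p :: rest) =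
              loopLvl grid rows cols (levelFoldL grid rows cols (v, []) (p :: rest)).1 (d + 1)
                (levelFoldL grid rows cols (v, []) (p :: rest)).2 from by rw [loopLvl]]
          rw [← hrec]
          show (if dilate grid rows cols prev = prev then _ else _) = _
          rw [if_neg (by rw [← hdil]; exact hv)]
          rw [← hdil]
        · exact hstep3

-- ===== VERDICT (by name: the statement is the Claim_ definition above) =====
theorem maxDistance_spec : Claim_equal_maxDistance := by
  intro grid _ _
  unfold Spec_maxDistance
  obtain ⟨hshS, hentS, hmemS⟩ := pv_seedchar grid (grid.length : Int)
    ((grid.headD []).length : Int) (by omega)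
  have hs0 : pvShape (grid.length : Int) ((grid.headD []).length : Int)
      (landInit grid (grid.length : Int) ((grid.headD []).length : Int)) := by
    unfold landInit; exact pv_shape_mk _
  have hent0 : ∀ x y : Int, pvInb (grid.length : Int) ((grid.headD []).length : Int) x y →
      pvGetB (landInit grid (grid.length : Int) ((grid.headD []).length : Int)) x y =
        decide (pvCell grid x y = 1) := by
    intro x y hi
    unfold landInit
    exact pv_getB_mk _ hi
  -- the seed state satisfies the loop invariant
  have hinv0 : pvInv grid (grid.length : Int) ((grid.headD []).length : Int)
      (seedL grid (grid.length : Int) ((grid.headD []).length : Int)).1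
      (seedL grid (grid.length : Int) ((grid.headD []).length : Int)).2 := by
    refine ⟨hshS, ?_, ?_⟩
    · intro p hp
      obtain ⟨hia, hc, rest⟩ := (hmemS p).mp hp
      exact ⟨hia, hc, (hentS p.1 p.2 hia.1 hia.2.2.1).mpr (Or.inr ⟨hia, hc, rest⟩)⟩
    · intro x y hi hw hb d hd hi2 hb2
      rcases (hentS (x + d.1) (y + d.2) hi2.1 hi2.2.2.1).mp hb2 with
        ⟨hia2, hp2, hc2⟩ | ⟨hia2, hc2, rest2⟩
      · exfalso
        have hx : pvGetB (seedL grid (grid.length : Int) ((grid.headD []).length : Int)).1 x y = true :=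
          (hentS x y hi.1 hi.2.2.1).mpr (Or.inr ⟨hi, hw, d, hd, hi2, Or.inl hi2.2.1, hc2⟩)
        rw [hb] at hx
        cases hx
      · exact (hmemS (x + d.1, y + d.2)).mpr ⟨hi2, hc2, rest2⟩
  -- the seed visited matrix is one dilation of the land matrix
  have hdil0 : (seedL grid (grid.length : Int) ((grid.headD []).length : Int)).1 =
      dilate grid (grid.length : Int) ((grid.headD []).length : Int)
        (landInit grid (grid.length : Int) ((grid.headD []).length : Int)) := by
    apply pv_mat_ext hshS (pv_shape_dilate _ _ _ _)
    intro x y hi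
    apply pv_bool_ext
    have hdE : pvGetB (dilate grid (grid.length : Int) ((grid.headD []).length : Int)
        (landInit grid (grid.length : Int) ((grid.headD []).length : Int))) x y = true ↔
        (pvCell grid x y = 1 ∨ (pvCell grid x y = 0 ∧
          ∃ d ∈ pvDirs, pvInb (grid.length : Int) ((grid.headD []).length : Int)
            (x + d.1) (y + d.2) ∧ pvCell grid (x + d.1) (y + d.2) = 1)) := by
      rw [pv_getB_dilate _ _ _ _ hi]
      simp only [Bool.or_eq_true, Bool.and_eq_true, List.any_eq_true, decide_eq_true_eq]
      constructor
      · rintro (hv | ⟨hw, d, hd, ⟨⟨⟨⟨h1, h2⟩, h3⟩, h4⟩, h5⟩⟩)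
        · rw [hent0 x y hi] at hv
          exact Or.inl (by simpa using hv)
        · rw [hent0 (x + d.1) (y + d.2) ⟨h1, h2, h3, h4⟩] at h5
          exact Or.inr ⟨hw, d, hd, ⟨h1, h2, h3, h4⟩, by simpa using h5⟩
      · rintro (hl | ⟨hw, d, hd, hbnd, hc⟩)
        · refine Or.inl ?_
          rw [hent0 x y hi]
          simpa using hl
        · refine Or.inr ⟨hw, d, hd, ⟨⟨⟨⟨hbnd.1, hbnd.2.1⟩, hbnd.2.2.1⟩, hbnd.2.2.2⟩, ?_⟩⟩
          rw [hent0 (x + d.1) (y + d.2) hbnd]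
          simpa using hc
    rw [hentS x y hi.1 hi.2.2.1, hdE]
    constructor
    · rintro (⟨hia, hp, hc⟩ | ⟨hia, hc, d, hd, hib, hp2, hc2⟩)
      · exact Or.inl hc
      · exact Or.inr ⟨hc, d, hd, hib, hc2⟩
    · rintro (hl | ⟨hw, d, hd, hbnd, hc⟩)
      · exact Or.inl ⟨hi, Or.inl hi.2.1, hl⟩
      · exact Or.inr ⟨hi, hw, d, hd, hbnd, Or.inl hbnd.2.1, hc⟩
  -- the seed frontier is empty iff the first dilation changed nothing
  have hemp0 : (seedL grid (grid.length : Int) ((grid.headD []).length : Int)).2 = [] ↔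
      (seedL grid (grid.length : Int) ((grid.headD []).length : Int)).1 =
        landInit grid (grid.length : Int) ((grid.headD []).length : Int) := by
    constructor
    · intro h2
      apply pv_mat_ext hshS hs0
      intro x y hi
      apply pv_bool_ext
      rw [hentS x y hi.1 hi.2.2.1, hent0 x y hi]
      constructor
      · rintro (⟨hia, hp, hc⟩ | ⟨hia, hc, rest⟩)
        · simpa using hc
        · exfalso
          have hm : (x, y) ∈ (seedL grid (grid.length : Int) ((grid.headD []).length : Int)).2 :=
            (hmemS (x, y)).mpr ⟨hia, hc, rest⟩
          rw [h2] at hm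
          simp at hm
      · intro hdec
        exact Or.inl ⟨hi, Or.inl hi.2.1, by simpa using hdec⟩
    · intro h1
      cases hL : (seedL grid (grid.length : Int) ((grid.headD []).length : Int)).2 with
      | nil => rfl
      | cons q qs =>
        exfalso
        have hq : q ∈ (seedL grid (grid.length : Int) ((grid.headD []).length : Int)).2 := by
          rw [hL]; exact List.mem_cons_self
        obtain ⟨hia, hc, rest⟩ := (hmemS q).mp hq
        have ht : pvGetB (seedL grid (grid.length : Int) ((grid.headD []).length : Int)).1 q.1 q.2 = true :=
          (hentS q.1 q.2 hia.1 hia.2.2.1).mpr (Or.inr ⟨hia, hc, rest⟩)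
        rw [h1, hent0 q.1 q.2 hia] at ht
        have hc1 : pvCell grid q.1 q.2 = 1 := by simpa using ht
        rw [hc1] at hc
        exact absurd hc (by norm_num)
  -- fuel bound
  have hcf0 : pvCF (landInit grid (grid.length : Int) ((grid.headD []).length : Int)) ≤
      (((grid.length : Int)) * ((grid.headD []).length : Int)).toNat := by
    have hb := pv_cf_bound hs0
    have he : (((grid.length : Int)) * ((grid.headD []).length : Int)).toNat =
        ((grid.length : Int)).toNat * (((grid.headD []).length : Int)).toNat := by
      rw [show ((grid.length : Int)) * ((grid.headD []).length : Int) =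
            ((grid.length * (grid.headD []).length : Nat) : Int) from by push_cast; ring]
      rw [Int.toNat_natCast, Int.toNat_natCast, Int.toNat_natCast]
    omega
  have hcorr := pv_loopcorr grid (grid.length : Int) ((grid.headD []).length : Int)
    (((grid.length : Int)) * ((grid.headD []).length : Int)).toNat
    (landInit grid (grid.length : Int) ((grid.headD []).length : Int))
    (seedL grid (grid.length : Int) ((grid.headD []).length : Int)).1
    (seedL grid (grid.length : Int) ((grid.headD []).length : Int)).2
    0 hs0 hinv0 hdil0 hemp0 hcf0
  have hA : maxDistance grid =
      (if 0 < loopLvl grid (grid.length : Int) ((grid.headD []).length : Int)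
            (seedL grid (grid.length : Int) ((grid.headD []).length : Int)).1 0
            (seedL grid (grid.length : Int) ((grid.headD []).length : Int)).2
       then loopLvl grid (grid.length : Int) ((grid.headD []).length : Int)
            (seedL grid (grid.length : Int) ((grid.headD []).length : Int)).1 0
            (seedL grid (grid.length : Int) ((grid.headD []).length : Int)).2
       else -1) := by
    show loopA grid (grid.length : Int) ((grid.headD []).length : Int)
        (seedA grid (grid.length : Int) ((grid.headD []).length : Int)).1 (-1)
        (seedA grid (grid.length : Int) ((grid.headD []).length : Int)).2 = _
    rw [pv_seedAL]
    have h := pv_OL grid (grid.length : Int) ((grid.headD []).length : Int)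
        (2 * pvCF (seedL grid (grid.length : Int) ((grid.headD []).length : Int)).1 +
          (seedL grid (grid.length : Int) ((grid.headD []).length : Int)).2.length)
        (seedL grid (grid.length : Int) ((grid.headD []).length : Int)).1 0
        (seedL grid (grid.length : Int) ((grid.headD []).length : Int)).2
        (le_refl _) (le_refl 0)
    simpa using h
  have hB : maxDistance_alt grid =
      loopDil grid (grid.length : Int) ((grid.headD []).length : Int)
        (((grid.length : Int)) * ((grid.headD []).length : Int)).toNat
        (landInit grid (grid.length : Int) ((grid.headD []).length : Int)) 0 := rfl
  rw [hA, hB, hcorr]
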